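-- pv_equiv track=rewrite | github.com/Lanver123/CompeticionProgramacion | shellSort/shellSort.py | shellShort
-- ===== SOURCE A (Python) =====
-- def shellShort(original, target):
--     moveTo = [0] * len(original)
--
--     # guardar la posicion que tienen en el ordenado
--     posTarget = {}
--
--     for i in range(len(target)):
--         turtle = target[i]
--         posTarget[turtle] = i
--
--     res = []
--     j = 0
--     # recorrerlo desde abajo
--     for i in reversed(range(len(original))):
--         turtleOrig = original[i]
--         posTurtleTarget = posTarget.get(turtleOrig)
--         if i != posTurtleTarget - j:
--             j += 1
--             res.append(posTurtleTarget)
--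
--     # en este punto se tienen los indices a mover de la lista final.
--     # falta ordenarlos en orden descendente y sacar los nombres
--     return [target[i] for i in sorted(res, reverse=True)]
-- ===== SOURCE B (Python) =====
-- def shellShort(original, target):
--     # Greedy suffix match: an element stays put iff its target index is the next
--     # unmatched suffix position; everything else is bucketed by target index and
--     # emitted in one descending bucket walk (counting sort, no comparison sort).
--     pos = {v: i for i, v in enumerate(target)}
--     count = [0] * len(target)
--     want = len(original) - 1
--     for x in reversed(original):
--         p = pos[x]
--         if p == want:
--             want -= 1
--         else:
--             count[p] += 1
--     out = []
--     for i in range(len(target) - 1, -1, -1):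
--         out.extend([target[i]] * count[i])
--     return out
-- ===== Notes on version B (the rewrite author's own statement) =====
-- stated objective: alternative
-- what changed: B drops A's (i, j) index/offset bookkeeping and comparison sort entirely: a single backward scan greedily matches the target's suffix with one 'want' counter (an element stays iff its target position equals want), buckets every other element by target index in a counting array, and emits the result by one descending bucket walk (counting sort); O(n) overall vs A's O(n log n), though CPython's C-level sorted() makes the wall-clock gain negligible.
import Mathlib
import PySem

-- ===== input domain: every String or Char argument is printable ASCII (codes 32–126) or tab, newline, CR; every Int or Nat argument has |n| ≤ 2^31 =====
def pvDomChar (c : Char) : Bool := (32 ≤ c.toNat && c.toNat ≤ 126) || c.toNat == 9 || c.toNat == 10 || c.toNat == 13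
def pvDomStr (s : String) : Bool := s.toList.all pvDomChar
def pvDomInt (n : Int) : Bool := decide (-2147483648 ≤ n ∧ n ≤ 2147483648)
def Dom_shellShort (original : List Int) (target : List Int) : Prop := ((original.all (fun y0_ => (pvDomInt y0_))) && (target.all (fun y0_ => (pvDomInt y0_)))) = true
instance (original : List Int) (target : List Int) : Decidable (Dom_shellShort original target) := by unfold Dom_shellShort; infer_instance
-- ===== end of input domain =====

-- B replaces A's index/offset bookkeeping (i, j) and comparison sort by a greedy suffix
-- match with a single 'want' counter plus a counting-sort bucket emission (objective: alternative).

-- ===== PORT A =====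
def shellShort (original : List Int) (target : List Int) : List Int :=
  -- posTarget[target[i]] = i for i in range(len(target)); target[i] is in range, so pyGetD … 0 is exact
  let posTarget : PySem.Dict Int Int :=
    (PySem.List.pyRange 0 (target.length : Int)).foldl
      (fun d i => d.insert (PySem.List.pyGetD target i 0) i) PySem.Dict.empty
  -- for i in reversed(range(len(original))): posTarget.get(original[i]) is None exactly outside
  -- Pre_shellShort (Python then raises TypeError on None - j); getD 0 is exact inside Pre_
  let st : List Int × Int :=
    ((PySem.List.pyRange 0 (original.length : Int)).reverse).foldl
      (fun (st : List Int × Int) i =>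
        let p := (posTarget.get? (PySem.List.pyGetD original i 0)).getD 0
        if i ≠ p - st.2 then (st.1 ++ [p], st.2 + 1) else st)
      ([], 0)
  -- return [target[i] for i in sorted(res, reverse=True)]; every i in res is a dict value, in range
  (PySem.List.sorted st.1 (fun x => x) true).map (fun i => PySem.List.pyGetD target i 0)

-- ===== PORT B =====
def shellShort_alt (original : List Int) (target : List Int) : List Int :=
  -- pos = {v: i for i, v in enumerate(target)}
  let pos : PySem.Dict Int Int :=
    (PySem.List.enumerate target).foldl (fun d iv => d.insert iv.2 iv.1) PySem.Dict.empty
  -- for x in reversed(original): pos[x] raises KeyError exactly outside Pre_shellShort,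
  -- so getD 0 is exact inside Pre_; p is a dict value hence 0 ≤ p, so p.toNat is exact
  let st : List Int × Int :=
    original.reverse.foldl
      (fun (st : List Int × Int) x =>
        let p := (pos.get? x).getD 0
        if p = st.2 then (st.1, st.2 - 1)
        else (st.1.set p.toNat (st.1.getD p.toNat 0 + 1), st.2))
      (List.replicate target.length 0, (original.length : Int) - 1)
  -- for i in range(len(target) - 1, -1, -1): out.extend([target[i]] * count[i]); counts ≥ 0, so .toNat is exact
  (PySem.List.pyRange ((target.length : Int) - 1) (-1) (-1)).foldl
    (fun out i => out ++ List.replicate ((st.1.getD i.toNat 0)).toNat (PySem.List.pyGetD target i 0)) []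

-- ===== PRECONDITION & SPEC =====
-- Pre_ excludes exactly the inputs where A raises: some element of original is absent from target
-- (A's posTarget.get returns None and 'None - j' raises TypeError; B's pos[…] raises KeyError).
def Pre_shellShort (original : List Int) (target : List Int) : Prop :=
  ∀ x ∈ original, x ∈ target
instance (original : List Int) (target : List Int) : Decidable (Pre_shellShort original target) := by
  unfold Pre_shellShort; infer_instance

def pvWitness_shellShort : List Int × List Int := ([2, 1, 3], [1, 2, 3])

def Spec_shellShort (original : List Int) (target : List Int) (out : List Int) : Prop := out = shellShort_alt original target
instance (original : List Int) (target : List Int) (out : List Int) : Decidable (Spec_shellShort original target out) := by unfold Spec_shellShort; infer_instance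

-- ===== CLAIM (what is proved, stated in full; the proofs are below) =====
def Claim_equal_shellShort : Prop := ∀ (original : List Int) (target : List Int), Dom_shellShort original target → Pre_shellShort original target → Spec_shellShort original target (shellShort original target)

-- ===== LEMMAS AND PROOFS =====

-- the position dict, as built by A; B's enumerate-built dict is the same (pvDict_eq)
def pvDict (target : List Int) : PySem.Dict Int Int :=
  (PySem.List.pyRange 0 (target.length : Int)).foldl
    (fun d i => d.insert (PySem.List.pyGetD target i 0) i) PySem.Dict.empty

theorem pvDict_eq (target : List Int) :
    (PySem.List.enumerate target).foldl (fun d iv => d.insert iv.2 iv.1) PySem.Dict.empty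
      = pvDict target := by
  rw [PySem.List.enumerate_eq_map_pyRange target 0, List.foldl_map]
  rfl

-- any value looked up in the dict is an index of target
theorem pvDict_val_aux (target : List Int) (L : List Int) (d0 : PySem.Dict Int Int) (k v : Int)
    (h : ((L.foldl (fun d i => d.insert (PySem.List.pyGetD target i 0) i) d0).get? k = some v)) :
    v ∈ L ∨ d0.get? k = some v := by
  induction L generalizing d0 with
  | nil => exact Or.inr h
  | cons i L ih =>
    rcases ih _ h with hv | hv
    · exact Or.inl (List.mem_cons_of_mem _ hv)
    · rw [PySem.Dict.get?_insert] at hv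
      split at hv
      · exact Or.inl (by simp [Option.some.inj hv])
      · exact Or.inr hv

theorem pvDict_val (target : List Int) (k v : Int) (h : (pvDict target).get? k = some v) :
    0 ≤ v ∧ v < (target.length : Int) := by
  rcases pvDict_val_aux target _ _ k v h with hv | hv
  · exact PySem.List.mem_pyRange_one.mp hv
  · simp [PySem.Dict.get?_empty] at hv

-- every element of target is a key of the dict
theorem pvDict_some_aux (target : List Int) (L : List Int) (d0 : PySem.Dict Int Int) (x : Int)
    (h : x ∈ L.map (fun i => PySem.List.pyGetD target i 0) ∨ ((d0.get? x).isSome)) :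
    (((L.foldl (fun d i => d.insert (PySem.List.pyGetD target i 0) i) d0).get? x).isSome) := by
  induction L generalizing d0 with
  | nil => simpa using h.resolve_left (by simp)
  | cons i L ih =>
    apply ih
    rcases h with hm | hs
    · rcases List.mem_cons.mp hm with he | hm
      · right; rw [PySem.Dict.get?_insert]; simp [he]
      · exact Or.inl hm
    · by_cases hx : x = PySem.List.pyGetD target i 0
      · right; rw [PySem.Dict.get?_insert]; simp [hx]
      · right; rw [PySem.Dict.get?_insert]; simpa [hx] using hs

theorem pvDict_some (target : List Int) (x : Int) (hx : x ∈ target) :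
    (((pvDict target).get? x).isSome) := by
  apply pvDict_some_aux
  left
  rw [show (target.length : Int) = PySem.List.len target from rfl,
      PySem.List.map_pyGetD_pyRange_zero target 0]
  exact hx

-- joint invariant of the two scans: A over reversed indices with offset j, B over reversed
-- elements with want = i + j; B's bucket array holds the multiplicities of A's res list
theorem pvJoint (target original : List Int) (m : Nat) (hm : m ≤ original.length)
    (hL : ∀ i ∈ PySem.List.pyRange 0 (m : Int),
      (((pvDict target).get? (PySem.List.pyGetD original i 0)).isSome)) :
    ∀ (res count : List Int) (j : Int),
    count.length = target.length →
    (∀ k : Nat, k < target.length → count.getD k 0 = (res.count (k : Int) : Int)) →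
    (∀ x ∈ res, 0 ≤ x ∧ x < (target.length : Int)) →
    (let rA := ((PySem.List.pyRange 0 (m : Int)).reverse).foldl
        (fun (st : List Int × Int) i =>
          let p := ((pvDict target).get? (PySem.List.pyGetD original i 0)).getD 0
          if i ≠ p - st.2 then (st.1 ++ [p], st.2 + 1) else st) (res, j)
     let rB := ((original.take m).reverse).foldl
        (fun (st : List Int × Int) x =>
          let p := ((pvDict target).get? x).getD 0
          if p = st.2 then (st.1, st.2 - 1)
          else (st.1.set p.toNat (st.1.getD p.toNat 0 + 1), st.2)) (count, (m : Int) - 1 + j)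
     rB.1.length = target.length ∧
       (∀ k : Nat, k < target.length → rB.1.getD k 0 = (rA.1.count (k : Int) : Int)) ∧
       (∀ x ∈ rA.1, 0 ≤ x ∧ x < (target.length : Int))) := by
  induction m with
  | zero =>
    intro res count j h1 h2 h3
    simpa [PySem.List.pyRange_one_eq_nil] using ⟨h1, h2, h3⟩
  | succ m ih =>
    intro res count j h1 h2 h3
    have hmlt : m < original.length := hm
    have hRcons : (PySem.List.pyRange 0 ((m + 1 : Nat) : Int)).reverse
        = (m : Int) :: (PySem.List.pyRange 0 (m : Int)).reverse := by
      have : ((m + 1 : Nat) : Int) = (m : Int) + 1 := by push_cast; ring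
      rw [this, PySem.List.pyRange_one_succ_right (by positivity), List.reverse_append]
      simp
    have hTcons : (original.take (m + 1)).reverse
        = original[m] :: (original.take m).reverse := by
      rw [List.take_add_one, List.getElem?_eq_getElem hmlt]
      simp
    have hget : PySem.List.pyGetD original (m : Int) 0 = original[m] := by
      rw [PySem.List.pyGetD_eq_getElem original 0 (by positivity) (by exact_mod_cast hmlt)]
      simp
    have hLm : ∀ i ∈ PySem.List.pyRange 0 (m : Int),
        (((pvDict target).get? (PySem.List.pyGetD original i 0)).isSome) := by
      intro i hi
      apply hL
      rw [PySem.List.mem_pyRange_one] at hi ⊢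
      constructor
      · exact hi.1
      · have := hi.2; push_cast; omega
    obtain ⟨p, hp⟩ := Option.isSome_iff_exists.mp
      (hL (m : Int) (PySem.List.mem_pyRange_one.mpr ⟨by positivity, by push_cast; omega⟩))
    obtain ⟨hp0, hplt⟩ := pvDict_val target _ p hp
    rw [hget] at hp
    rw [hRcons, hTcons]
    simp only [List.foldl_cons, hget, hp, Option.getD_some]
    by_cases hc : p = (m : Int) + j
    · -- element stays: A's condition i ≠ p - j is false, B decrements want
      have hcA : ¬ ((m : Int) ≠ p - j) := by omega
      have hcB : p = ((m + 1 : Nat) : Int) - 1 + j := by push_cast; omega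
      simp only [if_neg hcA, if_pos hcB]
      have hwant : ((m + 1 : Nat) : Int) - 1 + j - 1 = (m : Int) - 1 + j := by push_cast; ring
      rw [hwant]
      exact ih (le_of_lt hmlt) hLm res count j h1 h2 h3
    · -- element moves: A appends p, B increments bucket p
      have hcA : ((m : Int) ≠ p - j) := by omega
      have hcB : ¬ (p = ((m + 1 : Nat) : Int) - 1 + j) := by push_cast; omega
      simp only [if_pos hcA, if_neg hcB]
      have hwant : ((m + 1 : Nat) : Int) - 1 + j = (m : Int) - 1 + (j + 1) := by push_cast; ring
      rw [hwant]
      apply ih (le_of_lt hmlt) hLm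
      · rw [List.length_set]; exact h1
      · intro k hk
        have hpk : p.toNat < count.length := by rw [h1]; omega
        rw [List.getD_eq_getElem?_getD, List.getElem?_set, List.count_append]
        by_cases hkp : p.toNat = k
        · subst hkp
          have hcast : ((p.toNat : Nat) : Int) = p := by omega
          have h2p := h2 p.toNat (by omega)
          simp only [if_pos hpk, h2p, hcast]
          have : List.count p [p] = 1 := by simp
          rw [this]
          push_cast
          simp
        · have hne : ¬ (p = (k : Int)) := by omega
          simp only [if_neg hkp]
          rw [← List.getD_eq_getElem?_getD, h2 k hk]
          have : List.count ((k : Nat) : Int) [p] = 0 := by rw [List.count_eq_zero]; simp; omega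
          rw [this]
          push_cast
          ring
      · intro x hx
        rcases List.mem_append.mp hx with hx | hx
        · exact h3 x hx
        · rw [List.mem_singleton.mp hx]; exact ⟨hp0, hplt⟩

theorem pvCountFlat (res : List Int) (L : List Int) (hnd : L.Nodup) (x : Int) :
    (L.flatMap (fun i => List.replicate (res.count i) i)).count x
      = if x ∈ L then res.count x else 0 := by
  induction L with
  | nil => simp
  | cons i L ih =>
    rcases List.nodup_cons.mp hnd with ⟨hi, hnd2⟩
    rw [List.flatMap_cons, List.count_append, ih hnd2, List.count_replicate]
    by_cases hx : x = i
    · subst hx; simp [hi]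
    · simp [hx, List.mem_cons, Ne.symm hx]

-- descending flatMap of replicates is sorted-descending and a permutation of res
theorem pvPerm (res : List Int) (L : List Int) (hnd : L.Nodup)
    (hcover : ∀ x ∈ res, x ∈ L) :
    (L.flatMap (fun i => List.replicate (res.count i) i)).Perm res := by
  rw [List.perm_iff_count]
  intro x
  rw [pvCountFlat res L hnd x]
  by_cases hx : x ∈ L
  · simp [hx]
  · simp [hx, List.count_eq_zero_of_not_mem (fun hm => hx (hcover x hm))]

theorem pvPairwise (res : List Int) (L : List Int) (hdesc : L.Pairwise (fun a b => b < a)) :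
    (L.flatMap (fun i => List.replicate (res.count i) i)).Pairwise (fun a b : Int => b ≤ a) := by
  induction L with
  | nil => simp
  | cons i L ih =>
    rcases List.pairwise_cons.mp hdesc with ⟨hi, hdesc2⟩
    rw [List.flatMap_cons, List.pairwise_append]
    refine ⟨?_, ih hdesc2, ?_⟩
    · rw [List.pairwise_replicate]; right; exact le_refl i
    · intro a ha b hb
      rcases List.mem_flatMap.mp hb with ⟨z, hz, hbz⟩
      rw [List.eq_of_mem_replicate ha, List.eq_of_mem_replicate hbz]
      exact le_of_lt (hi z hz)

theorem pvSortedEq (res : List Int) (L : List Int) (hnd : L.Nodup)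
    (hcover : ∀ x ∈ res, x ∈ L) (hdesc : L.Pairwise (fun a b => b < a)) :
    PySem.List.sorted res (fun x => x) true = L.flatMap (fun i => List.replicate (res.count i) i) := by
  apply PySem.List.eq_of_perm_of_pairwise_le_of_injective (key := fun x : Int => -x) neg_injective
  · exact (PySem.List.sorted_perm res _ true).trans (pvPerm res L hnd hcover).symm
  · exact (PySem.List.sorted_pairwise_rev res _).imp (by intro a b h; simpa using h)
  · exact (pvPairwise res L hdesc).imp (by intro a b h; simpa using h)

-- the two scan folds, named for the proof (definitionally the folds inside the ports)
def pvFoldA (original target : List Int) : List Int × Int :=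
  ((PySem.List.pyRange 0 (original.length : Int)).reverse).foldl
    (fun (st : List Int × Int) i =>
      let p := ((pvDict target).get? (PySem.List.pyGetD original i 0)).getD 0
      if i ≠ p - st.2 then (st.1 ++ [p], st.2 + 1) else st) ([], 0)

def pvDictB (target : List Int) : PySem.Dict Int Int :=
  (PySem.List.enumerate target).foldl (fun d iv => d.insert iv.2 iv.1) PySem.Dict.empty

def pvFoldB (original target : List Int) : List Int × Int :=
  original.reverse.foldl
    (fun (st : List Int × Int) x =>
      let p := ((pvDictB target).get? x).getD 0
      if p = st.2 then (st.1, st.2 - 1)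
      else (st.1.set p.toNat (st.1.getD p.toNat 0 + 1), st.2))
    (List.replicate target.length 0, (original.length : Int) - 1)

theorem pvFoldB_eq (original target : List Int) :
    pvFoldB original target =
    ((original.take original.length).reverse).foldl
      (fun (st : List Int × Int) x =>
        let p := ((pvDict target).get? x).getD 0
        if p = st.2 then (st.1, st.2 - 1)
        else (st.1.set p.toNat (st.1.getD p.toNat 0 + 1), st.2))
      (List.replicate target.length 0, (original.length : Int) - 1 + 0) := by
  unfold pvFoldB pvDictB
  rw [pvDict_eq, List.take_length]
  norm_num

-- the descending index list of target: nodup and strictly decreasing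
theorem pvIdx_nodup (n : Nat) : ((PySem.List.pyRange 0 (n : Int)).reverse).Nodup := by
  rw [PySem.List.pyRange_zero_natCast, List.nodup_reverse]
  exact List.nodup_range.map (fun a b h => by exact_mod_cast h)

theorem pvIdx_desc (n : Nat) :
    ((PySem.List.pyRange 0 (n : Int)).reverse).Pairwise (fun a b : Int => b < a) := by
  rw [PySem.List.pyRange_zero_natCast, List.pairwise_reverse]
  exact (List.pairwise_lt_range.map _ (fun a b h => by exact_mod_cast h))

-- B's countdown range is the reversed ascending range
theorem pvRangeDown (n : Nat) :
    PySem.List.pyRange ((n : Int) - 1) (-1) (-1) = (PySem.List.pyRange 0 (n : Int)).reverse := by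
  rw [PySem.List.pyRange_neg_one_eq_reverse]
  norm_num

theorem shellShort_spec' (original target : List Int)
    (hpre : Pre_shellShort original target) :
    shellShort original target = shellShort_alt original target := by
  have hA : shellShort original target =
      (PySem.List.sorted (pvFoldA original target).1 (fun x => x) true).map
        (fun i => PySem.List.pyGetD target i 0) := rfl
  have hB : shellShort_alt original target =
      (PySem.List.pyRange ((target.length : Int) - 1) (-1) (-1)).foldl
        (fun out i => out ++
          List.replicate ((pvFoldB original target).1.getD i.toNat 0).toNat
            (PySem.List.pyGetD target i 0)) [] := rfl
  have hL : ∀ i ∈ PySem.List.pyRange 0 (original.length : Int),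
      (((pvDict target).get? (PySem.List.pyGetD original i 0)).isSome) := by
    intro i hi
    obtain ⟨h0, h1⟩ := PySem.List.mem_pyRange_one.mp hi
    apply pvDict_some
    apply hpre
    rw [PySem.List.pyGetD_eq_getElem original 0 h0 h1]
    exact List.getElem_mem _
  have hscan := pvJoint target original original.length (le_refl _) hL
    [] (List.replicate target.length 0) 0
    (by simp) (by intro k hk; simp) (by simp)
  rw [← pvFoldB_eq original target] at hscan
  obtain ⟨_, hcnt, hmem⟩ := hscan
  rw [hA, hB, pvRangeDown, PySem.List.foldl_append_eq_flatMap, List.nil_append,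
    pvSortedEq (pvFoldA original target).1 _ (pvIdx_nodup target.length)
      (fun x hx => by
        rw [List.mem_reverse, PySem.List.mem_pyRange_one]
        exact (hmem x hx))
      (pvIdx_desc target.length),
    List.map_flatMap]
  apply List.flatMap_congr
  intro i hi
  rw [List.mem_reverse] at hi
  obtain ⟨h0, h1⟩ := PySem.List.mem_pyRange_one.mp hi
  have hk : i.toNat < target.length := by omega
  have hcast : ((i.toNat : Nat) : Int) = i := by omega
  rw [List.map_replicate, hcnt i.toNat hk, hcast, Int.toNat_natCast]
  rfl

-- ===== VERDICT (by name: the statement is the Claim_ definition above) =====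
theorem shellShort_spec : Claim_equal_shellShort :=
  fun original target _ hpre => shellShort_spec' original target hpre
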